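-- pv_equiv track=rewrite | github.com/chrislucas/hackerrank-lp-python | ds/sets/NoIdea/solution/NoIdea.py | sv2
-- ===== SOURCE A (Python) =====
-- def sv2(set_a, set_b, numbers):
--     anb = (set_a - (set_a & set_b))
--     bna = (set_b - (set_a & set_b))
--     acc = 0
--     for i in numbers:
--         if i in anb:
--             acc += 1
--         if i in bna:
--             acc -= 1
--     return acc
-- ===== SOURCE B (Python) =====
-- def sv2(set_a, set_b, numbers):
--     count = {}
--     for n in numbers:
--         count[n] = count.get(n, 0) + 1
--     return sum(count.get(x, 0) for x in set_a) - sum(count.get(x, 0) for x in set_b)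
-- ===== Notes on version B (the rewrite author's own statement) =====
-- stated objective: alternative
-- what changed: B builds a frequency table of numbers once and sums the counts over each set (elements in both sets cancel), instead of A's per-number membership tests against the two precomputed set differences.
import Mathlib
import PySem

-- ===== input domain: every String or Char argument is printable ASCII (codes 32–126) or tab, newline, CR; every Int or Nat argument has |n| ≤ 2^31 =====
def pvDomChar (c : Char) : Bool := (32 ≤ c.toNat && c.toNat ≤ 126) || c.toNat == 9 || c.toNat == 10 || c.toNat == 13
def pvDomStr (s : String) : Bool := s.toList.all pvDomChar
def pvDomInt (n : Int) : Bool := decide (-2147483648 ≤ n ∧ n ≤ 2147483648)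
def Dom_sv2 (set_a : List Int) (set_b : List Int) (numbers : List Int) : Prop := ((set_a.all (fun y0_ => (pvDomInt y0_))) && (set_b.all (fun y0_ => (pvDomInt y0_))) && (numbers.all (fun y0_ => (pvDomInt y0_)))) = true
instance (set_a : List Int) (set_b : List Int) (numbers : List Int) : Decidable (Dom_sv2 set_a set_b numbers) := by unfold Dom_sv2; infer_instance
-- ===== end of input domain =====

-- B sums a once-built frequency table of `numbers` over each set (both-set elements cancel)
-- instead of A's per-number membership tests against the two set differences: alternative decomposition, same cost.


-- ===== PORT A =====
def sv2 (set_a : List Int) (set_b : List Int) (numbers : List Int) : Int :=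
  let anb := PySem.Set.diff set_a (PySem.Set.inter set_a set_b)
  let bna := PySem.Set.diff set_b (PySem.Set.inter set_a set_b)
  numbers.foldl (fun acc i =>
    let acc := if PySem.Set.contains anb i then acc + 1 else acc
    if PySem.Set.contains bna i then acc - 1 else acc) 0

-- ===== PORT B =====
def sv2_alt (set_a : List Int) (set_b : List Int) (numbers : List Int) : Int :=
  let count := numbers.foldl (fun d n => d.insert n (d.getD n 0 + 1)) (PySem.Dict.empty : PySem.Dict Int Int)
  set_a.foldl (fun s x => s + count.getD x 0) 0 - set_b.foldl (fun s x => s + count.getD x 0) 0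

-- ===== PRECONDITION & SPEC =====
-- set_a and set_b are Python sets: their List Int encodings hold distinct elements (the type convention).
def Pre_sv2 (set_a : List Int) (set_b : List Int) (numbers : List Int) : Prop :=
  set_a.Nodup ∧ set_b.Nodup
instance (set_a : List Int) (set_b : List Int) (numbers : List Int) : Decidable (Pre_sv2 set_a set_b numbers) := by unfold Pre_sv2; infer_instance
def pvWitness_sv2 : List Int × List Int × List Int := ([1, 2, 4], [2, 3], [1, 2, 2, 3, 5])

def Spec_sv2 (set_a : List Int) (set_b : List Int) (numbers : List Int) (out : Int) : Prop := out = sv2_alt set_a set_b numbers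
instance (set_a : List Int) (set_b : List Int) (numbers : List Int) (out : Int) : Decidable (Spec_sv2 set_a set_b numbers out) := by unfold Spec_sv2; infer_instance

-- ===== CLAIM (what is proved, stated in full; the proofs are below) =====
def Claim_equal_sv2 : Prop := ∀ (set_a : List Int) (set_b : List Int) (numbers : List Int), Dom_sv2 set_a set_b numbers → Pre_sv2 set_a set_b numbers → Spec_sv2 set_a set_b numbers (sv2 set_a set_b numbers)

-- ===== LEMMAS AND PROOFS =====

-- A's loop body, as a per-element contribution added to the accumulator.
lemma sv2_loop_sum (anb bna : List Int) (numbers : List Int) (acc : Int) :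
    numbers.foldl (fun acc i =>
      let acc := if PySem.Set.contains anb i then acc + 1 else acc
      if PySem.Set.contains bna i then acc - 1 else acc) acc
    = acc + (numbers.map (fun i =>
        (if i ∈ anb then (1 : Int) else 0) - (if i ∈ bna then (1 : Int) else 0))).sum := by
  induction numbers generalizing acc with
  | nil => simp
  | cons n ns ih =>
    simp only [List.foldl_cons, List.map_cons, List.sum_cons, ih]
    simp only [PySem.Set.contains_eq_listContains, List.contains_eq_mem]
    by_cases h1 : n ∈ anb <;> by_cases h2 : n ∈ bna <;> simp [h1, h2] <;> ring

-- B's sum over a duplicate-free set of counts = the number of elements of `numbers` lying in the set.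
lemma count_as_sum_diff (x : Int) (xs : List Int) (hx : x ∉ xs) (numbers : List Int) :
    (numbers.count x : Int)
    = (numbers.map (fun i => if i ∈ (x :: xs) then (1 : Int) else 0)).sum
      - (numbers.map (fun i => if i ∈ xs then (1 : Int) else 0)).sum := by
  induction numbers with
  | nil => simp
  | cons n ns ihn =>
    simp only [List.map_cons, List.sum_cons, List.mem_cons]
    by_cases hnx : n = x
    · subst hnx
      rw [List.count_cons_self]
      push_cast
      rw [ihn]
      simp [hx]
      ring
    · rw [List.count_cons_of_ne (by exact_mod_cast hnx)]
      rw [ihn]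
      simp only [List.mem_cons, hnx, false_or]
      by_cases hnxs : n ∈ xs
      · simp [hnxs]
      · simp [hnxs]

-- B's sum over a duplicate-free set of counts = the number of elements of `numbers` lying in the set.
lemma sum_counts_eq (l numbers : List Int) (hl : l.Nodup) (s : Int) :
    l.foldl (fun s x => s + (numbers.count x : Int)) s
    = s + (numbers.map (fun i => if i ∈ l then (1 : Int) else 0)).sum := by
  induction l generalizing s with
  | nil => simp
  | cons x xs ih =>
    rcases List.nodup_cons.mp hl with ⟨hx, hxs⟩
    simp only [List.foldl_cons, ih hxs]
    rw [count_as_sum_diff x xs hx numbers]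
    ring

lemma sum_map_sub_int (f g : Int → Int) (l : List Int) :
    (l.map (fun i => f i - g i)).sum = (l.map f).sum - (l.map g).sum := by
  induction l with
  | nil => simp
  | cons x xs ih => simp only [List.map_cons, List.sum_cons, ih]; ring

theorem sv2_eq (set_a set_b numbers : List Int) (ha : set_a.Nodup) (hb : set_b.Nodup) :
    sv2 set_a set_b numbers = sv2_alt set_a set_b numbers := by
  unfold sv2 sv2_alt
  simp only [PySem.Dict.getD_foldl_insert_add_one, PySem.Dict.getD_empty, zero_add]
  rw [sv2_loop_sum, sum_counts_eq set_a numbers ha, sum_counts_eq set_b numbers hb]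
  simp only [zero_add]
  have hfun : ∀ i : Int,
      ((if i ∈ PySem.Set.diff set_a (PySem.Set.inter set_a set_b) then (1 : Int) else 0)
        - (if i ∈ PySem.Set.diff set_b (PySem.Set.inter set_a set_b) then (1 : Int) else 0))
      = (fun i => (if i ∈ set_a then (1 : Int) else 0) - (if i ∈ set_b then (1 : Int) else 0)) i := by
    intro i
    simp only [PySem.Set.mem_diff, PySem.Set.mem_inter]
    by_cases h1 : i ∈ set_a <;> by_cases h2 : i ∈ set_b <;> simp [h1, h2]
  simp only [hfun]
  rw [sum_map_sub_int (fun i => if i ∈ set_a then (1 : Int) else 0)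
        (fun i => if i ∈ set_b then (1 : Int) else 0) numbers]

-- ===== VERDICT (by name: the statement is the Claim_ definition above) =====
theorem sv2_spec : Claim_equal_sv2 := by
  intro set_a set_b numbers _ hpre
  unfold Spec_sv2
  exact sv2_eq set_a set_b numbers hpre.1 hpre.2
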